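-- pv_equiv track=rewrite | github.com/sfumato00/LeetCode-Solutions | python/medium/1501-2000/1841_count_nice_pairs_in_an_array.py | countNicePairs
-- ===== SOURCE A (Python) =====
-- from collections import defaultdict
-- from typing import List
--
-- def countNicePairs(nums: List[int]) -> int:
--     def rev(x):
--         return int(str(x)[::-1])
--
--     MOD = 10**9 + 7
--     mem = defaultdict(int)
--     for x in nums:
--         y = rev(x)
--         k = x - y
--         mem[k] += 1
--         mem[k] %= MOD
--
--     ans = 0
--     for cnt in mem.values():
--         ans += (cnt * (cnt - 1)) // 2
--         ans %= MOD
--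
--     return ans
-- ===== SOURCE B (Python) =====
-- from collections import defaultdict
-- from typing import List
--
-- def countNicePairs(nums: List[int]) -> int:
--     def rev(x):
--         return int(str(x)[::-1])
--
--     MOD = 10**9 + 7
--     seen = defaultdict(int)
--     ans = 0
--     for x in nums:
--         k = x - rev(x)
--         ans = (ans + seen[k]) % MOD
--         seen[k] += 1
--     return ans
-- ===== Notes on version B (the rewrite author's own statement) =====
-- stated objective: simpler
-- what changed: The build-a-frequency-dict pass followed by a second loop summing cnt*(cnt-1)//2 over its values is fused into one pass that adds, for each element, the number of earlier elements with the same key x-rev(x); the combinatorial C(cnt,2) formula and the second loop disappear.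
import Mathlib
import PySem

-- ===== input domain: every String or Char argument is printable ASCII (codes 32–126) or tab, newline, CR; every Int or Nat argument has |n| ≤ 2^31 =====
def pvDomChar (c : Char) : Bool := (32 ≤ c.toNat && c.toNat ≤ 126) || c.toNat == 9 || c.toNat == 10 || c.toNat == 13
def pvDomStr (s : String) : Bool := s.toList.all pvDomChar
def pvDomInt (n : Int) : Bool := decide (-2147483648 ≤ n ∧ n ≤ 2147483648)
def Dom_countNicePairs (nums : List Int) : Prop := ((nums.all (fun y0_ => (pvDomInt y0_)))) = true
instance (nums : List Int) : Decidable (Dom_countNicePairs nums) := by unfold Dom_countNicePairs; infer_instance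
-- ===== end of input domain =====

-- B fuses A's two passes (build a count dict, then sum cnt*(cnt-1)//2 over its values) into one
-- pass that counts each element against the earlier elements with the same key x - rev(x).

-- ===== PORT A =====
-- rev(x) = int(str(x)[::-1]); Python raises ValueError for x < 0 (excluded by Pre_), where
-- ofChars? is none and we default to 0.
def pvRev (x : Int) : Int :=
  (PySem.Int.ofChars? ((PySem.Int.toChars x).reverse)).getD 0

def countNicePairs (nums : List Int) : Int :=
  let mem := nums.foldl (fun d x =>
    let y := pvRev x
    let k := x - y
    let d1 := d.insert k (d.getD k 0 + 1)
    d1.insert k (PySem.Int.mod (d1.getD k 0) 1000000007)) (PySem.Dict.empty : PySem.Dict Int Int)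
  mem.values.foldl (fun ans cnt =>
    PySem.Int.mod (ans + PySem.Int.floordiv (cnt * (cnt - 1)) 2) 1000000007) 0

-- ===== PORT B =====
def countNicePairs_alt (nums : List Int) : Int :=
  (nums.foldl (fun sa x =>
    let k := x - pvRev x
    (sa.1.insert k (sa.1.getD k 0 + 1), PySem.Int.mod (sa.2 + sa.1.getD k 0) 1000000007))
    ((PySem.Dict.empty : PySem.Dict Int Int), (0 : Int))).2

-- ===== PRECONDITION & SPEC =====
-- Pre_ excludes lists with a negative element: there int(str(x)[::-1]) raises ValueError in
-- both A and B (str(-12)[::-1] = '21-').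
def Pre_countNicePairs (nums : List Int) : Prop := ∀ x ∈ nums, 0 ≤ x
instance (nums : List Int) : Decidable (Pre_countNicePairs nums) := by unfold Pre_countNicePairs; infer_instance
def pvWitness_countNicePairs : List Int := [13, 31, 13, 2, 0]

def Spec_countNicePairs (nums : List Int) (out : Int) : Prop := out = countNicePairs_alt nums
instance (nums : List Int) (out : Int) : Decidable (Spec_countNicePairs nums out) := by unfold Spec_countNicePairs; infer_instance

-- ===== CLAIM (what is proved, stated in full; the proofs are below) =====
def Claim_equal_countNicePairs : Prop := ∀ (nums : List Int), Dom_countNicePairs nums → Pre_countNicePairs nums → Spec_countNicePairs nums (countNicePairs nums)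

-- ===== LEMMAS AND PROOFS =====

-- key function and the exact C(c,2) term
def pvK (x : Int) : Int := x - pvRev x
def pvC2 (c : Int) : Int := c * (c - 1) / 2

-- exact grouped sum of C(count,2) over the distinct keys: the common value both programs reduce to
def pvF (m : List Int) : Int :=
  ((PySem.Set.ofList m).map (fun a => pvC2 (m.count a : Int))).sum

lemma pvC2_succ (c : Int) : pvC2 (c + 1) = pvC2 c + c := by
  unfold pvC2
  have h : (c + 1) * (c + 1 - 1) = c * (c - 1) + c * 2 := by ring
  rw [h, Int.add_mul_ediv_right _ _ (by norm_num : (2:Int) ≠ 0)]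

lemma sum_map_ite_eq {s : List Int} {k : Int} (hn : s.Nodup) (hk : k ∈ s) (c : Int) :
    (s.map (fun a => if a = k then c else 0)).sum = c := by
  induction s with
  | nil => cases hk
  | cons b t ih =>
    by_cases h : b = k
    · subst h
      have hb : b ∉ t := (List.nodup_cons.mp hn).1
      have hz : (t.map (fun a => if a = b then c else 0)).sum = 0 := by
        apply List.sum_eq_zero
        intro x hx
        rcases List.mem_map.mp hx with ⟨a, ha, rfl⟩
        rw [if_neg]
        rintro rfl
        exact hb ha
      simp [hz]
    · have hk' : k ∈ t := by
        rcases List.mem_cons.mp hk with h' | h'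
        · exact absurd h'.symm h
        · exact h'
      simp only [List.map_cons, List.sum_cons, if_neg h]
      rw [ih (List.nodup_cons.mp hn).2 hk']
      ring

lemma pvF_append (m : List Int) (k : Int) :
    pvF (m ++ [k]) = pvF m + m.count k := by
  unfold pvF
  have hofl : PySem.Set.ofList (m ++ [k]) = PySem.Set.add (PySem.Set.ofList m) k := by
    rw [PySem.Set.ofList_eq_foldl, PySem.Set.ofList_eq_foldl, List.foldl_append]
    rfl
  by_cases hk : k ∈ m
  · rw [hofl, PySem.Set.add_of_mem ((PySem.Set.mem_ofList _ _).mpr hk)]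
    have hcong : (PySem.Set.ofList m).map (fun a => pvC2 ((m ++ [k]).count a : Int))
        = (PySem.Set.ofList m).map (fun a =>
            pvC2 (m.count a : Int) + (if a = k then (m.count k : Int) else 0)) := by
      apply List.map_congr_left
      intro a _
      by_cases hak : a = k
      · subst hak
        rw [List.count_append, List.count_singleton, if_pos (by simp), if_pos rfl]
        push_cast
        rw [pvC2_succ]
      · rw [List.count_append, List.count_singleton, if_neg (by simp only [beq_iff_eq]; exact Ne.symm hak), if_neg hak]
        simp
    rw [hcong, PySem.List.sum_map_add_int,
        sum_map_ite_eq (PySem.Set.nodup_ofList m) ((PySem.Set.mem_ofList _ _).mpr hk)]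
  · rw [hofl, PySem.Set.add_of_not_mem (fun h => hk ((PySem.Set.mem_ofList _ _).mp h))]
    rw [List.map_append, List.sum_append]
    have h0 : m.count k = 0 := List.count_eq_zero.mpr hk
    have hcong : (PySem.Set.ofList m).map (fun a => pvC2 ((m ++ [k]).count a : Int))
        = (PySem.Set.ofList m).map (fun a => pvC2 (m.count a : Int)) := by
      apply List.map_congr_left
      intro a ha
      have hak : a ≠ k := fun h => hk (h ▸ (PySem.Set.mem_ofList _ _).mp ha)
      rw [List.count_append, List.count_singleton, if_neg (by simp only [beq_iff_eq]; exact Ne.symm hak)]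
      simp
    rw [hcong, h0]
    simp [List.count_append, List.count_singleton, h0, pvC2]

lemma two_dvd_mul_pred (c : Int) : (2:Int) ∣ c * (c - 1) := by
  rcases Int.even_or_odd c with h | h
  · exact Dvd.dvd.mul_right h.two_dvd _
  · exact Dvd.dvd.mul_left (h.sub_odd odd_one).two_dvd _

lemma pvC2_mod (c : Int) : pvC2 (c % 1000000007) % 1000000007 = pvC2 c % 1000000007 := by
  set p : Int := 1000000007 with hp
  set r : Int := c % p with hr
  have h2c : 2 * pvC2 c = c * (c - 1) := by
    unfold pvC2; rw [Int.mul_ediv_cancel' (two_dvd_mul_pred c)]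
  have h2r : 2 * pvC2 r = r * (r - 1) := by
    unfold pvC2; rw [Int.mul_ediv_cancel' (two_dvd_mul_pred r)]
  have hcr : p ∣ c - r := by
    rw [hr, Int.emod_def]; exact ⟨c / p, by ring⟩
  have hbig : p ∣ 2 * (pvC2 c - pvC2 r) := by
    have h : 2 * (pvC2 c - pvC2 r) = (c - r) * (c + r - 1) := by
      rw [mul_sub, h2c, h2r]; ring
    rw [h]; exact hcr.mul_right _
  have hcop : IsCoprime (p : Int) 2 := by
    rw [Int.isCoprime_iff_gcd_eq_one]; decide
  have hfin : p ∣ pvC2 c - pvC2 r := hcop.dvd_of_dvd_mul_left hbig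
  exact Int.modEq_iff_dvd.mpr hfin

-- fold with per-step mod = mod of the sum
lemma foldl_mod_sum (g : Int → Int) (l : List Int) (a0 : Int) :
    l.foldl (fun a c => (a + g c) % 1000000007) (a0 % 1000000007)
      = (a0 + (l.map g).sum) % 1000000007 := by
  induction l generalizing a0 with
  | nil => simp
  | cons c t ih =>
    simp only [List.foldl_cons, List.map_cons, List.sum_cons]
    have h : (a0 % 1000000007 + g c) % 1000000007 = (a0 + g c) % 1000000007 := by omega
    rw [h, ih (a0 + g c)]
    ring_nf

lemma sum_map_mod_congr (s : List Int) (f g : Int → Int)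
    (h : ∀ a ∈ s, f a % 1000000007 = g a % 1000000007) :
    (s.map f).sum % 1000000007 = (s.map g).sum % 1000000007 := by
  induction s with
  | nil => rfl
  | cons b t ih =>
    simp only [List.map_cons, List.sum_cons]
    have h1 : Int.ModEq 1000000007 (f b) (g b) := h b (List.mem_cons_self)
    have h2 : Int.ModEq 1000000007 (t.map f).sum (t.map g).sum :=
      ih (fun a ha => h a (List.mem_cons_of_mem _ ha))
    exact h1.add h2

lemma memA_items (l : List Int) :
    (l.foldl (fun d x =>
      let y := pvRev x
      let k := x - y
      let d1 := d.insert k (d.getD k 0 + 1)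
      d1.insert k (PySem.Int.mod (d1.getD k 0) 1000000007)) (PySem.Dict.empty : PySem.Dict Int Int)).items
    = (PySem.Set.ofList (l.map pvK)).map
        (fun a => (a, ((l.map pvK).count a : Int) % 1000000007)) := by
  have hmod : ∀ a : Int, PySem.Int.mod a 1000000007 = a % 1000000007 :=
    fun a => PySem.Int.mod_eq_emod_of_pos (by norm_num)
  induction l using List.reverseRecOn with
  | nil => simp [PySem.Dict.empty]
  | append_singleton t x ih =>
    rw [List.foldl_append, List.foldl_cons, List.foldl_nil]
    set d := t.foldl (fun d x =>
      let y := pvRev x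
      let k := x - y
      let d1 := d.insert k (d.getD k 0 + 1)
      d1.insert k (PySem.Int.mod (d1.getD k 0) 1000000007)) (PySem.Dict.empty : PySem.Dict Int Int) with hd
    set m := t.map pvK with hm
    set S := PySem.Set.ofList m with hS
    have hkeys : d.keys = S := by
      show d.items.map (·.1) = S
      rw [ih, List.map_map]
      simp [Function.comp_def]
    have hnodupS : S.Nodup := PySem.Set.nodup_ofList m
    have hnodup : d.keys.Nodup := by rw [hkeys]; exact hnodupS
    have hk : (x - pvRev x) = pvK x := rfl
    simp only [hk, hmod]
    rw [List.map_append, List.map_cons, List.map_nil]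
    have hofl : PySem.Set.ofList (m ++ [pvK x]) = PySem.Set.add S (pvK x) := by
      rw [hS, PySem.Set.ofList_eq_foldl, PySem.Set.ofList_eq_foldl, List.foldl_append]
      rfl
    rw [PySem.Dict.getD_insert_self]
    by_cases hmem : pvK x ∈ S
    · have hcont : d.contains (pvK x) = true := by
        rw [PySem.Dict.contains_eq_decide_mem_keys, hkeys]
        exact decide_eq_true hmem
      have hgetD : d.getD (pvK x) 0 = ((m.count (pvK x) : Int) % 1000000007) := by
        apply PySem.Dict.getD_of_mem_items d ?_ hnodup
        rw [ih]
        exact List.mem_map.mpr ⟨pvK x, hmem, rfl⟩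
      have hcont1 : (d.insert (pvK x) (d.getD (pvK x) 0 + 1)).contains (pvK x) = true :=
        PySem.Dict.contains_insert_self _ _ _
      rw [PySem.Dict.items_insert_of_contains _ _ hcont1,
          PySem.Dict.items_insert_of_contains _ _ hcont, List.map_map, ih, List.map_map,
          hofl, PySem.Set.add_of_mem hmem]
      apply List.map_congr_left
      intro a ha
      simp only [Function.comp_def]
      by_cases hak : a = pvK x
      · subst hak
        simp only [beq_self_eq_true, if_true, hgetD]
        rw [List.count_append, List.count_singleton, if_pos (by simp)]
        rw [← hm]
        push_cast
        congr 1
        omega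
      · simp only [beq_iff_eq, if_neg hak]
        rw [List.count_append, List.count_singleton,
            if_neg (by simp only [beq_iff_eq]; exact fun h => hak h.symm)]
        rw [← hm]
        simp
    · have hcont : d.contains (pvK x) = false := by
        rw [PySem.Dict.contains_eq_decide_mem_keys, hkeys]
        exact decide_eq_false hmem
      have hnotm : pvK x ∉ m := fun h => hmem ((PySem.Set.mem_ofList m (pvK x)).mpr h)
      have hcont1 : (d.insert (pvK x) (d.getD (pvK x) 0 + 1)).contains (pvK x) = true :=
        PySem.Dict.contains_insert_self _ _ _
      rw [PySem.Dict.items_insert_of_contains _ _ hcont1,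
          PySem.Dict.items_insert_of_not_contains _ _ hcont,
          PySem.Dict.getD_of_not_contains _ _ hcont,
          List.map_append, List.map_cons, List.map_nil, ih, List.map_map,
          hofl, PySem.Set.add_of_not_mem hmem, List.map_append, List.map_cons, List.map_nil]
    -- remaining: two pieces of the append
      congr 1
      · apply List.map_congr_left
        intro a ha
        have hak : a ≠ pvK x := fun h => hmem (h ▸ ha)
        simp only [Function.comp_def, beq_iff_eq, if_neg hak]
        rw [List.count_append, List.count_singleton,
            if_neg (by simp only [beq_iff_eq]; exact fun h => hak h.symm)]
        rw [← hm]
        simp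
      · rw [List.count_append, List.count_singleton, if_pos (by simp),
            List.count_eq_zero.mpr hnotm]
        simp only [beq_self_eq_true, if_true]
        norm_num

lemma altB_state (l : List Int) :
    l.foldl (fun sa x =>
      let k := x - pvRev x
      (sa.1.insert k (sa.1.getD k 0 + 1), PySem.Int.mod (sa.2 + sa.1.getD k 0) 1000000007))
      ((PySem.Dict.empty : PySem.Dict Int Int), (0 : Int))
    = (PySem.Dict.counter (l.map pvK), pvF (l.map pvK) % 1000000007) := by
  have hmod : ∀ a : Int, PySem.Int.mod a 1000000007 = a % 1000000007 :=
    fun a => PySem.Int.mod_eq_emod_of_pos (by norm_num)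
  induction l using List.reverseRecOn with
  | nil => simp [pvF, PySem.Dict.counter]
  | append_singleton t x ih =>
    rw [List.foldl_append, ih]
    simp only [List.foldl_cons, List.foldl_nil, hmod]
    rw [List.map_append]
    simp only [List.map_cons, List.map_nil]
    have hk : (x - pvRev x) = pvK x := rfl
    rw [hk]
    refine Prod.ext ?_ ?_
    · dsimp only
      rw [← PySem.Dict.foldl_insert_getD_add_one_eq_counter,
          ← PySem.Dict.foldl_insert_getD_add_one_eq_counter, List.foldl_append]
      simp
    · dsimp only
      rw [PySem.Dict.getD_counter, pvF_append]
      omega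

-- ===== VERDICT (by name: the statement is the Claim_ definition above) =====
theorem countNicePairs_spec : Claim_equal_countNicePairs := by
  intro nums _ _
  unfold Spec_countNicePairs
  have hmod : ∀ a : Int, PySem.Int.mod a 1000000007 = a % 1000000007 :=
    fun a => PySem.Int.mod_eq_emod_of_pos (by norm_num)
  have hdiv : ∀ a : Int, PySem.Int.floordiv a 2 = a / 2 :=
    fun a => PySem.Int.floordiv_eq_ediv_of_pos (by norm_num)
  simp only [countNicePairs, countNicePairs_alt]
  rw [altB_state nums]
  simp only [PySem.Dict.values]
  rw [memA_items nums, List.map_map]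
  simp only [hmod, hdiv, Function.comp_def]
  have h2 := foldl_mod_sum pvC2
    ((PySem.Set.ofList (nums.map pvK)).map (fun a => ((nums.map pvK).count a : Int) % 1000000007)) 0
  simp only [pvC2] at h2
  norm_num at h2
  rw [h2]
  unfold pvF
  apply sum_map_mod_congr
  intro a _
  simpa [Function.comp_def] using pvC2_mod ((nums.map pvK).count a : Int)
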